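-- pv_equiv track=rewrite | github.com/adbrasi/prompta_generita | prompt_generator_node.py | _distribute_backgrounds
-- ===== SOURCE A (Python) =====
-- from typing import List, Tuple, Dict, Optional, Any
--
-- def _distribute_backgrounds(backgrounds: List[str], total: int) -> List[str]:
--     if not backgrounds or total <= 0:
--         return []
--     if total <= len(backgrounds):
--         return backgrounds[:total]
--     base = total // len(backgrounds)
--     rem = total % len(backgrounds)
--     counts = [base] * len(backgrounds)
--     if rem:
--         counts[-1] += rem
--     assignments: List[str] = []
--     for bg, cnt in zip(backgrounds, counts):
--         if cnt > 0:
--             assignments.extend([bg] * cnt)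
--     return assignments[:total]
-- ===== SOURCE B (Python) =====
-- def _distribute_backgrounds(backgrounds, total):
--     if not backgrounds or total <= 0:
--         return []
--     if total <= len(backgrounds):
--         return backgrounds[:total]
--     base = total // len(backgrounds)
--     last = len(backgrounds) - 1
--     return [backgrounds[min(i // base, last)] for i in range(total)]
-- ===== Notes on version B (the rewrite author's own statement) =====
-- stated objective: simpler
-- what changed: Replaces A's counts list plus nested extend loop by a single positional comprehension that maps each output index i directly to backgrounds[min(i // base, len-1)], the min cap sending the remainder slots to the last background.
import Mathlib
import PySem

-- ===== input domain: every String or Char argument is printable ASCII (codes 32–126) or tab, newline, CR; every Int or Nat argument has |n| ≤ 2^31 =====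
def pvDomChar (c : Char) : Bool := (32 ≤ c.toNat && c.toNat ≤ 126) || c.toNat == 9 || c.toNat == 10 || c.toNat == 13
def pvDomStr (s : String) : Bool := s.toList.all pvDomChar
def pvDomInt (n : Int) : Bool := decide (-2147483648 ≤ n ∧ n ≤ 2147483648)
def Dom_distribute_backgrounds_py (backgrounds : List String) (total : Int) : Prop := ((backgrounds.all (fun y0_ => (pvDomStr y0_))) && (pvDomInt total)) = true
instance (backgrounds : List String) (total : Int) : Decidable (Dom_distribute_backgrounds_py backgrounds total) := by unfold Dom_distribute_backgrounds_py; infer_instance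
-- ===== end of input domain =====

-- B replaces A's counts list and nested extend loop by one positional comprehension
-- mapping each output index to a background (simpler; return value only, no mutation).


-- ===== PORT A =====
def distribute_backgrounds_py (backgrounds : List String) (total : Int) : List String :=
  if backgrounds = [] ∨ total ≤ 0 then []
  else if total ≤ (backgrounds.length : Int) then PySem.List.slice backgrounds none (some total)
  else
    let base := PySem.Int.floordiv total (backgrounds.length : Int)
    let rem := PySem.Int.mod total (backgrounds.length : Int)
    let counts := List.replicate backgrounds.length base
    -- counts[-1] += rem : in-place update of the last slot (list nonempty here)
    let counts := if rem ≠ 0 then counts.set (counts.length - 1) (base + rem) else counts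
    let assignments := (backgrounds.zip counts).foldl
      (fun acc p => if p.2 > 0 then acc ++ List.replicate p.2.toNat p.1 else acc) []
    PySem.List.slice assignments none (some total)

-- ===== PORT B =====
def distribute_backgrounds_py_alt (backgrounds : List String) (total : Int) : List String :=
  if backgrounds = [] ∨ total ≤ 0 then []
  else if total ≤ (backgrounds.length : Int) then PySem.List.slice backgrounds none (some total)
  else
    let base := PySem.Int.floordiv total (backgrounds.length : Int)
    let last : Int := (backgrounds.length : Int) - 1
    -- backgrounds[min(i // base, last)] : the index is always in range, so the default is unreachable
    (PySem.List.pyRange 0 total 1).map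
      (fun i => PySem.List.pyGetD backgrounds (min (PySem.Int.floordiv i base) last) "")

-- ===== PRECONDITION & SPEC =====
def Spec_distribute_backgrounds_py (backgrounds : List String) (total : Int) (out : List String) : Prop := out = distribute_backgrounds_py_alt backgrounds total
instance (backgrounds : List String) (total : Int) (out : List String) : Decidable (Spec_distribute_backgrounds_py backgrounds total out) := by unfold Spec_distribute_backgrounds_py; infer_instance

-- ===== CLAIM (what is proved, stated in full; the proofs are below) =====
def Claim_equal_distribute_backgrounds_py : Prop := ∀ (backgrounds : List String) (total : Int), Dom_distribute_backgrounds_py backgrounds total → Spec_distribute_backgrounds_py backgrounds total (distribute_backgrounds_py backgrounds total)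

-- ===== LEMMAS AND PROOFS =====

-- A's accumulation loop is [] ++ the flatMap of its per-pair contribution.
theorem pv_foldl_if_append (l : List (String × Int)) (acc : List String) :
    l.foldl (fun acc p => if p.2 > 0 then acc ++ List.replicate p.2.toNat p.1 else acc) acc
      = acc ++ l.flatMap (fun p => if p.2 > 0 then List.replicate p.2.toNat p.1 else []) := by
  induction l generalizing acc with
  | nil => simp
  | cons p l ih =>
    by_cases h : p.2 > 0 <;> simp [List.foldl_cons, h, ih, List.append_assoc]

-- replicate-set: bumping the last slot splits the counts list
theorem pv_replicate_set (m : Nat) (c d : Int) :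
    (List.replicate (m + 1) c).set m d = List.replicate m c ++ [d] := by
  induction m with
  | zero => simp
  | succ k ih =>
    rw [List.replicate_succ, List.set_cons_succ, ih, List.replicate_succ, List.cons_append]

theorem pv_zip_replicate_flatMap (ys : List String) (c : Int) (hc : 0 < c) :
    (ys.zip (List.replicate ys.length c)).flatMap
        (fun p => if p.2 > 0 then List.replicate p.2.toNat p.1 else [])
      = ys.flatMap (fun x => List.replicate c.toNat x) := by
  induction ys with
  | nil => simp
  | cons y ys ih => simp [List.replicate_succ, hc, ih]

theorem pv_flat_length (ys : List String) (b : Nat) :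
    (ys.flatMap (fun x => List.replicate b x)).length = b * ys.length := by
  induction ys with
  | nil => simp
  | cons y ys ih => simp [ih]; ring

theorem pv_flat_getElem? (ys : List String) (b : Nat) (hb : 0 < b) (i : Nat)
    (hi : i < b * ys.length) :
    (ys.flatMap (fun x => List.replicate b x))[i]? = ys[i / b]? := by
  induction ys generalizing i with
  | nil => simp at hi
  | cons y ys ih =>
    simp only [List.flatMap_cons]
    by_cases h : i < b
    · rw [List.getElem?_append_left (by simpa using h)]
      simp [Nat.div_eq_of_lt h, h]
    · rw [Nat.not_lt] at h
      rw [List.getElem?_append_right (by simpa using h)]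
      simp only [List.length_replicate]
      rw [ih (i - b) (by
        have hx : b * (ys.length + 1) = b * ys.length + b := by ring
        simp [List.length_cons] at hi; omega)]
      have hdiv : i / b = (i - b) / b + 1 := Nat.div_eq_sub_div hb h
      rw [hdiv]
      simp

-- grouped replication equals positional indexing with the remainder capped onto the last element
theorem pv_main (ys : List String) (z : String) (b r : Nat) (hb : 0 < b) :
    ys.flatMap (fun x => List.replicate b x) ++ List.replicate (b + r) z
      = (List.range (b * ys.length + (b + r))).map
          (fun i => (ys ++ [z]).getD (min (i / b) ys.length) "") := by
  apply List.ext_getElem?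
  intro i
  have hlen : (ys.flatMap (fun x => List.replicate b x)).length = b * ys.length :=
    pv_flat_length ys b
  by_cases h1 : i < b * ys.length
  · have hit : i < b * ys.length + (b + r) := by omega
    rw [List.getElem?_append_left (by rw [hlen]; exact h1)]
    rw [pv_flat_getElem? ys b hb i h1]
    have hib : i / b < ys.length := by
      rw [Nat.div_lt_iff_lt_mul hb, Nat.mul_comm]; exact h1
    have hmin : min (i / b) ys.length = i / b := Nat.min_eq_left (Nat.le_of_lt hib)
    have hgd : (ys ++ [z]).getD (i / b) "" = ys[i / b] := by
      rw [List.getD_eq_getElem?_getD, List.getElem?_append_left hib,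
        List.getElem?_eq_getElem hib, Option.getD_some]
    rw [List.getElem?_eq_getElem hib]
    simp [hit, hmin, List.getElem_append_left hib]
  · rw [Nat.not_lt] at h1
    by_cases h2 : i < b * ys.length + (b + r)
    · rw [List.getElem?_append_right (by rw [hlen]; exact h1)]
      rw [hlen]
      have hrep : (List.replicate (b + r) z)[i - b * ys.length]? = some z := by
        rw [List.getElem?_replicate]
        simp only [if_pos (by omega : i - b * ys.length < b + r)]
      rw [hrep]
      have hmin : min (i / b) ys.length = ys.length := by
        refine Nat.min_eq_right ?_
        rw [Nat.le_div_iff_mul_le hb, Nat.mul_comm]; omega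
      have hgd : (ys ++ [z]).getD ys.length "" = z := by
        rw [List.getD_eq_getElem?_getD, List.getElem?_append_right (Nat.le_refl _)]
        simp
      simp [h2, hmin]
    · rw [Nat.not_lt] at h2
      rw [List.getElem?_eq_none (by simp [hlen]; omega),
        List.getElem?_eq_none (by simp; omega)]

-- ===== VERDICT (by name: the statement is the Claim_ definition above) =====
theorem distribute_backgrounds_py_spec : Claim_equal_distribute_backgrounds_py := by
  intro xs total _dom
  show distribute_backgrounds_py xs total = distribute_backgrounds_py_alt xs total
  unfold distribute_backgrounds_py distribute_backgrounds_py_alt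
  split_ifs with h1 h2
  · rfl
  · rfl
  · -- main case: xs ≠ [], 0 < backgrounds.length < total
    rcases List.eq_nil_or_concat xs with hnil | ⟨ys, z, hxs⟩
    · exact absurd (Or.inl hnil) h1
    rw [List.concat_eq_append] at hxs
    subst hxs
    push Not at h1 h2
    set t : Nat := total.toNat with ht
    have htot : (t : Int) = total := Int.toNat_of_nonneg (by omega)
    have hn : (ys ++ [z]).length = ys.length + 1 := by simp
    have hnt : ys.length + 1 < t := by omega
    set b : Nat := t / (ys.length + 1) with hbb
    set r : Nat := t % (ys.length + 1) with hrr
    have hb : 0 < b := (Nat.one_le_div_iff (by omega)).mpr (by omega)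
    have hbr : (ys.length + 1) * b + r = t := Nat.div_add_mod t (ys.length + 1)
    -- the integer arithmetic of the ports reduces to the Nat quantities b, r
    have hbase : PySem.Int.floordiv total (((ys.length + 1 : Nat)) : Int) = (b : Int) := by
      rw [← htot]
      exact_mod_cast PySem.Int.floordiv_natCast t (ys.length + 1)
    have hrem : PySem.Int.mod total (((ys.length + 1 : Nat)) : Int) = (r : Int) := by
      rw [← htot]
      exact_mod_cast PySem.Int.mod_natCast t (ys.length + 1)
    simp only [hbase, hrem, hn, List.length_replicate]
    -- counts = replicate (n-1) b ++ [b + r] whether or not the last slot is bumped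
    have hcounts :
        (if (r : Int) ≠ 0 then
            (List.replicate (ys.length + 1) (b : Int)).set (ys.length + 1 - 1) ((b : Int) + r)
          else List.replicate (ys.length + 1) (b : Int))
          = List.replicate ys.length (b : Int) ++ [(b : Int) + r] := by
      by_cases hr : (r : Int) = 0
      · simp only [hr]
        rw [if_neg (by norm_num), List.replicate_succ']
        norm_num
      · rw [if_pos hr, Nat.add_sub_cancel, pv_replicate_set]
    rw [hcounts]
    rw [List.zip_append (by simp)]
    rw [pv_foldl_if_append, List.nil_append, List.flatMap_append]
    rw [pv_zip_replicate_flatMap ys (b : Int) (by exact_mod_cast hb)]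
    -- the singleton tail pair contributes replicate (b + r) z
    have htail : ([z].zip [(b : Int) + r]).flatMap
        (fun p => if p.2 > 0 then List.replicate p.2.toNat p.1 else [])
          = List.replicate (b + r) z := by
      simp only [List.zip_cons_cons, List.zip_nil_right, List.flatMap_cons, List.flatMap_nil]
      rw [if_pos (by positivity)]
      have hx : ((b : Int) + r).toNat = b + r := by omega
      rw [hx, List.append_nil]
    rw [htail]
    have hbnat : ((b : Int)).toNat = b := Int.toNat_natCast b
    rw [hbnat]
    -- B side: the comprehension over range(total)
    rw [← htot, PySem.List.pyRange_zero_natCast, List.map_map]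
    have hmapeq : (List.range t).map
          ((fun i => PySem.List.pyGetD (ys ++ [z])
              (min (PySem.Int.floordiv i ((b : Nat) : Int)) (((ys.length + 1 : Nat) : Int) - 1)) "") ∘
            (fun i : Nat => (i : Int)))
        = (List.range t).map (fun i => (ys ++ [z]).getD (min (i / b) ys.length) "") := by
      apply List.map_congr_left
      intro i _
      simp only [Function.comp_apply]
      have h1' : (((ys.length + 1 : Nat) : Int) - 1) = (ys.length : Int) := by push_cast; ring
      rw [h1', PySem.Int.floordiv_natCast, ← Nat.cast_min]
      try rw [PySem.List.pyGetD_natCast]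
      try rfl
    rw [hmapeq]
    have hteq : t = b * ys.length + (b + r) := by
      have hx : (ys.length + 1) * b = b * ys.length + b := by ring
      omega
    rw [PySem.List.slice_to_natCast]
    rw [hteq, pv_main ys z b r hb]
    rw [List.take_of_length_le (by simp)]
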